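-- pv_equiv track=rewrite | github.com/hallgrimur1471/programming | advent_of_code/2019/day_4_2_secure_container.py | has_two_strike
-- ===== SOURCE A (Python) =====
-- def has_two_strike(n):
--     strike = 0
--     last = None
--     for c in str(n):
--         if c == last:
--             strike += 1
--         elif c != last and strike == 2:
--             return True
--         else:
--             strike = 1
--         last = c
--
--     if strike == 2:
--         return True
--     return False
-- ===== SOURCE B (Python) =====
-- def has_two_strike(n):
--     s = str(n)
--     runs = []
--     i = 0
--     while i < len(s):
--         j = i
--         while j < len(s) and s[j] == s[i]:
--             j += 1
--         runs.append(j - i)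
--         i = j
--     return 2 in runs
-- ===== Notes on version B (the rewrite author's own statement) =====
-- stated objective: alternative
-- what changed: B splits the digit string into maximal runs and collects their lengths, then tests whether a run of length exactly two occurs, instead of A's incremental strike counter with an early return and a post-loop final-run check.
import Mathlib
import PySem

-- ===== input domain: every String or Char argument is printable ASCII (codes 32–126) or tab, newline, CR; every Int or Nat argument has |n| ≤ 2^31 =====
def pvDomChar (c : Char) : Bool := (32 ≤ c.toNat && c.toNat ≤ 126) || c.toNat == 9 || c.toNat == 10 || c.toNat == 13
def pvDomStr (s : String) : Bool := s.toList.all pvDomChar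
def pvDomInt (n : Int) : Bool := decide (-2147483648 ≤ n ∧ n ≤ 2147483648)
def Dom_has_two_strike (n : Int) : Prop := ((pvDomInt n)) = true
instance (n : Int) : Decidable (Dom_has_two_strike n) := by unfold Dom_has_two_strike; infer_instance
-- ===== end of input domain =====

-- B replaces A's incremental strike counter (with early return and post-loop check) by an
-- explicit split of str(n) into maximal runs followed by a membership test of length 2.

-- ===== PORT A =====
-- the for-loop of A: state (strike, last), early 'return True' folded into the recursion
def pvLoopA : List Char → Int → Option Char → Bool
  | [], strike, _ => strike == 2
  | c :: cs, strike, last =>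
    if some c == last then pvLoopA cs (strike + 1) last
    else if some c != last && strike == 2 then true
    else pvLoopA cs 1 (some c)

def has_two_strike (n : Int) : Bool := pvLoopA (PySem.Int.toStr n).toList 0 none

-- ===== PORT B =====
-- inner while: length of the prefix of cs equal to c (j advances while s[j] == s[i])
def pvTake (c : Char) : List Char → Nat
  | [] => 0
  | x :: xs => if x == c then pvTake c xs + 1 else 0

-- outer while: collect run lengths (j - i) into 'runs'
def pvRuns : List Char → List Int
  | [] => []
  | c :: cs =>
    let k := pvTake c cs
    ((k : Int) + 1) :: pvRuns (cs.drop k)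
termination_by cs => cs.length
decreasing_by simp

def has_two_strike_alt (n : Int) : Bool := (pvRuns (PySem.Int.toStr n).toList).contains 2

-- ===== PRECONDITION & SPEC =====
def Spec_has_two_strike (n : Int) (out : Bool) : Prop := out = has_two_strike_alt n
instance (n : Int) (out : Bool) : Decidable (Spec_has_two_strike n out) := by unfold Spec_has_two_strike; infer_instance

-- ===== CLAIM (what is proved, stated in full; the proofs are below) =====
def Claim_equal_has_two_strike : Prop := ∀ (n : Int), Dom_has_two_strike n → Spec_has_two_strike n (has_two_strike n)

-- ===== LEMMAS AND PROOFS =====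

theorem pvRuns_nil : pvRuns [] = [] := by unfold pvRuns; rfl

theorem pvRuns_cons (c : Char) (cs : List Char) :
    pvRuns (c :: cs) = ((pvTake c cs : Int) + 1) :: pvRuns (cs.drop (pvTake c cs)) := by
  conv_lhs => unfold pvRuns

-- A's loop with a run in progress: last = some c, strike = current run length so far.
theorem pvLoopA_run (cs : List Char) : ∀ (c : Char) (s : Int),
    pvLoopA cs s (some c)
      = ((s + (pvTake c cs : Int) == 2) || (pvRuns (cs.drop (pvTake c cs))).contains 2) := by
  induction cs with
  | nil =>
    intro c s
    simp [pvLoopA, pvTake, pvRuns_nil]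
  | cons x xs ih =>
    intro c s
    by_cases hx : x = c
    · subst hx
      rw [show pvLoopA (x :: xs) s (some x) = pvLoopA xs (s + 1) (some x) from by
        simp [pvLoopA]]
      rw [ih]
      rw [show pvTake x (x :: xs) = pvTake x xs + 1 from by simp [pvTake]]
      simp only [List.drop_succ_cons]
      push_cast
      rw [show s + 1 + (pvTake x xs : Int) = s + ((pvTake x xs : Int) + 1) from by ring]
    · have hb : (x == c) = false := by simp [hx]
      rw [show pvTake c (x :: xs) = 0 from by simp [pvTake, hb]]
      by_cases hs : s = 2
      · subst hs
        simp [pvLoopA, hx]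
      · rw [show pvLoopA (x :: xs) s (some c) = pvLoopA xs 1 (some x) from by
          simp [pvLoopA, hx, hs]]
        rw [ih x 1]
        simp only [List.drop_zero]
        rw [pvRuns_cons, Bool.eq_iff_iff]
        simp only [List.contains_cons, Bool.or_eq_true, beq_iff_eq]
        constructor
        · rintro (h | h)
          · right; left; omega
          · right; right; exact h
        · rintro (h | h | h)
          · exact absurd (by omega : s = 2) hs
          · left; omega
          · right; exact h

theorem pvLoopA_start (cs : List Char) : pvLoopA cs 0 none = (pvRuns cs).contains 2 := by
  cases cs with
  | nil => simp [pvLoopA, pvRuns_nil]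
  | cons c cs =>
    rw [show pvLoopA (c :: cs) 0 none = pvLoopA cs 1 (some c) from rfl]
    rw [pvLoopA_run, pvRuns_cons, Bool.eq_iff_iff]
    simp only [List.contains_cons, Bool.or_eq_true, beq_iff_eq]
    constructor <;> rintro (h | h)
    · left; omega
    · right; exact h
    · left; omega
    · right; exact h

-- ===== VERDICT (by name: the statement is the Claim_ definition above) =====
theorem has_two_strike_spec : Claim_equal_has_two_strike := by
  intro n _
  show has_two_strike n = has_two_strike_alt n
  unfold has_two_strike has_two_strike_alt
  exact pvLoopA_start _
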